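-- pv_equiv track=rewrite | github.com/jungyeji/Programmers-Algorithm | 2018_Kakao_Blind_Recruitment/[1차]프렌즈4블록.py | delBlock
-- ===== SOURCE A (Python) =====
-- def delBlock(m, n, board, delete):
--     count = 0
--     for i in range(m):
--         for j in range(n):
--             if delete[i][j]==True:
--                 count+=1
--                 board[i] = board[i][:j]+' '+board[i][j+1:]
--
--     rotated = []
--     for i in range(n):
--         tmp = ''
--         for j in range(m):
--             tmp += board[j][i]
--         rotated.append(tmp)
--
--     for i in range(n):
--         for j in range(m):
--             if rotated[i][j]==' ':
--                 rotated[i] = ' '+rotated[i][:j]+rotated[i][j+1:]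
--
--     rotated2 = []
--     for i in range(m):
--         tmp = ''
--         for j in range(n):
--             tmp += rotated[j][i]
--         rotated2.append(tmp)
--
--
--     return rotated2, count
-- ===== SOURCE B (Python) =====
-- def delBlock(m, n, board, delete):
--     count = sum(1 for i in range(m) for j in range(n) if delete[i][j])
--     cols = []
--     for j in range(n):
--         keep = [board[i][j] for i in range(m) if not delete[i][j] and board[i][j] != ' ']
--         cols.append(' ' * (m - len(keep)) + ''.join(keep))
--     return [''.join(cols[j][i] for j in range(n)) for i in range(m)], count
-- ===== Notes on version B (the rewrite author's own statement) =====
-- stated objective: simpler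
-- what changed: Replaces A's two full transposes and the in-place space-bubbling loop by a direct per-column gather: for each column collect the surviving non-space characters, pad spaces on top, and assemble the rows once; the count becomes a plain sum and board is no longer mutated (A mutates board in place; the equivalence claimed is about the return value).
-- outside the precondition, e.g. on delBlock(1, 2, ['a'], [[False, True]]): A returns (['a '], 1), B returns (['a '], 1)
import Mathlib
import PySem

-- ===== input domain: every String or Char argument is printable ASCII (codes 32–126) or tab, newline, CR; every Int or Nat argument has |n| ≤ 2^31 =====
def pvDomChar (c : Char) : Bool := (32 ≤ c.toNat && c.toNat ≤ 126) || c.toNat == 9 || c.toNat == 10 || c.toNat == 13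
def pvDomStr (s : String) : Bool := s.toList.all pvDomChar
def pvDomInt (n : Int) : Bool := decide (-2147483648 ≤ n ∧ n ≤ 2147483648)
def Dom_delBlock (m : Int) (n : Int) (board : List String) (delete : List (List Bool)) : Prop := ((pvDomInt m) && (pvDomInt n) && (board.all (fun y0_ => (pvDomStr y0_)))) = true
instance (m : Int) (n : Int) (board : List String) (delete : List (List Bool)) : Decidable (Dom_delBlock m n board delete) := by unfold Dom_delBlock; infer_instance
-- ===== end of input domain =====

-- B replaces A's two transposes + space-bubbling by a direct per-column gather (gravity done in one pass);
-- A mutates `board` in place, B does not: the equivalence proved here is about the RETURN value only.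

-- list index assignment 'xs[i] = v'; exact for the nonnegative in-range indices both ports use
def pvSet {α : Type} (l : List α) (i : Int) (v : α) : List α := l.set i.toNat v

-- ===== PORT A =====
def delBlock (m : Int) (n : Int) (board : List String) (delete : List (List Bool)) : List String × Int :=
  -- strings are ported as their List Char contents (PySem.Chars convention)
  let b0 : List (List Char) := board.map String.toList
  -- count = 0; for i in range(m): for j in range(n): if delete[i][j]: count += 1; board[i] = board[i][:j]+' '+board[i][j+1:]
  let st : List (List Char) × Int :=
    (PySem.List.pyRange 0 m 1).foldl (fun st i =>
      (PySem.List.pyRange 0 n 1).foldl (fun (st : List (List Char) × Int) j =>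
        if PySem.List.pyGetD (PySem.List.pyGetD delete i []) j false then
          let row := PySem.List.pyGetD st.1 i []
          (pvSet st.1 i (PySem.List.slice row none (some j) ++ [' '] ++ PySem.List.slice row (some (j + 1)) none),
           st.2 + 1)
        else st) st) (b0, 0)
  -- rotated = []; for i in range(n): tmp = ''.join over j of board[j][i]; rotated.append(tmp)
  let rotated : List (List Char) :=
    (PySem.List.pyRange 0 n 1).map (fun i =>
      (PySem.List.pyRange 0 m 1).foldl (fun tmp j =>
        tmp ++ [PySem.List.pyGetD (PySem.List.pyGetD st.1 j []) i ' ']) [])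
  -- for i in range(n): for j in range(m): if rotated[i][j]==' ': rotated[i] = ' '+rotated[i][:j]+rotated[i][j+1:]
  let rot2 : List (List Char) :=
    (PySem.List.pyRange 0 n 1).foldl (fun rot i =>
      (PySem.List.pyRange 0 m 1).foldl (fun rot j =>
        let r := PySem.List.pyGetD rot i []
        if PySem.List.pyGetD r j ' ' = ' ' then
          pvSet rot i (' ' :: (PySem.List.slice r none (some j) ++ PySem.List.slice r (some (j + 1)) none))
        else rot) rot) rotated
  -- rotated2 = []; for i in range(m): tmp = ''.join over j of rotated[j][i]; rotated2.append(tmp)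
  let rotated2 : List String :=
    (PySem.List.pyRange 0 m 1).map (fun i =>
      String.ofList ((PySem.List.pyRange 0 n 1).foldl (fun tmp j =>
        tmp ++ [PySem.List.pyGetD (PySem.List.pyGetD rot2 j []) i ' ']) []))
  (rotated2, st.2)

-- ===== PORT B =====
def delBlock_alt (m : Int) (n : Int) (board : List String) (delete : List (List Bool)) : List String × Int :=
  let b0 : List (List Char) := board.map String.toList
  -- count = sum(1 for i in range(m) for j in range(n) if delete[i][j])
  let count : Int :=
    ((PySem.List.pyRange 0 m 1).map (fun i =>
      ((PySem.List.pyRange 0 n 1).map (fun j =>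
        if PySem.List.pyGetD (PySem.List.pyGetD delete i []) j false then (1 : Int) else 0)).sum)).sum
  -- for j in range(n): keep = [board[i][j] for i in range(m) if not delete[i][j] and board[i][j] != ' ']
  --                    cols.append(' '*(m-len(keep)) + ''.join(keep))
  let cols : List (List Char) :=
    (PySem.List.pyRange 0 n 1).map (fun j =>
      let keep : List Char :=
        (PySem.List.pyRange 0 m 1).filterMap (fun i =>
          if PySem.List.pyGetD (PySem.List.pyGetD delete i []) j false = false ∧
             PySem.List.pyGetD (PySem.List.pyGetD b0 i []) j ' ' ≠ ' ' then
            some (PySem.List.pyGetD (PySem.List.pyGetD b0 i []) j ' ')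
          else none)
      List.replicate (m - (keep.length : Int)).toNat ' ' ++ keep)
  -- return [''.join(cols[j][i] for j in range(n)) for i in range(m)], count
  let rows : List String :=
    (PySem.List.pyRange 0 m 1).map (fun i =>
      String.ofList ((PySem.List.pyRange 0 n 1).map (fun j =>
        PySem.List.pyGetD (PySem.List.pyGetD cols j []) i ' ')))
  (rows, count)

-- ===== PRECONDITION & SPEC =====
-- Pre_ excludes the inputs where Python A raises an IndexError (grid indices past the ends of board/delete);
-- it is slightly narrower than A's return set: rows shorter than n whose missing positions all get deleted are
-- padded by A's slice-assignment and A still returns there (B agrees); that corner is excluded for simplicity.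
def Pre_delBlock (m : Int) (n : Int) (board : List String) (delete : List (List Bool)) : Prop :=
  0 < m → 0 < n →
    m ≤ (board.length : Int) ∧ m ≤ (delete.length : Int) ∧
    (∀ s ∈ board.take m.toNat, n ≤ (s.toList.length : Int)) ∧
    (∀ r ∈ delete.take m.toNat, n ≤ (r.length : Int))
instance (m : Int) (n : Int) (board : List String) (delete : List (List Bool)) : Decidable (Pre_delBlock m n board delete) := by unfold Pre_delBlock; infer_instance

def pvWitness_delBlock : Int × Int × List String × List (List Bool) :=
  (2, 2, ["ab", "cd"], [[true, false], [false, false]])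

def Spec_delBlock (m : Int) (n : Int) (board : List String) (delete : List (List Bool)) (out : List String × Int) : Prop := out = delBlock_alt m n board delete
instance (m : Int) (n : Int) (board : List String) (delete : List (List Bool)) (out : List String × Int) : Decidable (Spec_delBlock m n board delete out) := by unfold Spec_delBlock; infer_instance

-- ===== CLAIM (what is proved, stated in full; the proofs are below) =====
def Claim_equal_delBlock : Prop := ∀ (m : Int) (n : Int) (board : List String) (delete : List (List Bool)), Dom_delBlock m n board delete → Pre_delBlock m n board delete → Spec_delBlock m n board delete (delBlock m n board delete)

-- ===== LEMMAS AND PROOFS =====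

def pvRowDel (drow : List Bool) (N : Nat) (row : List Char) : List Char :=
  (List.range N).foldl (fun r j => if drow.getD j false then r.take j ++ [' '] ++ r.drop (j + 1) else r) row

def pvBubble (M : Nat) (c : List Char) : List Char :=
  (List.range M).foldl (fun r j => if r.getD j ' ' = ' ' then ' ' :: (r.take j ++ r.drop (j + 1)) else r) c

theorem pv_set_getD_self {α : Type} (l : List α) (i : Nat) (d : α) :
    l.set i (l.getD i d) = l := by
  induction l generalizing i with
  | nil => rfl
  | cons x xs ih => cases i with
    | zero => simp [List.getD]
    | succ k => simp only [List.set, List.getD_cons_succ, ih]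

theorem pvRowDel_length (drow : List Bool) (N : Nat) (row : List Char) (h : N ≤ row.length) :
    (pvRowDel drow N row).length = row.length := by
  induction N with
  | zero => rfl
  | succ k ih =>
    have hk := ih (by omega)
    simp only [pvRowDel, List.range_succ, List.foldl_append, List.foldl_cons, List.foldl_nil] at *
    split
    · simp only [List.length_append, List.length_take, List.length_drop, List.length_singleton, hk]
      omega
    · exact hk

theorem pvRowDel_getElem? (drow : List Bool) (N : Nat) (row : List Char) (h : N ≤ row.length) (j : Nat) :
    (pvRowDel drow N row)[j]? =
      if j < N ∧ drow.getD j false = true then some ' ' else row[j]? := by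
  induction N with
  | zero => simp [pvRowDel]
  | succ k ih =>
    have hk := ih (by omega)
    have hlen : (pvRowDel drow k row).length = row.length := pvRowDel_length drow k row (by omega)
    rw [pvRowDel, List.range_succ, List.foldl_append, List.foldl_cons, List.foldl_nil]
    rw [pvRowDel] at hk hlen
    set r := (List.range k).foldl (fun r j => if drow.getD j false then r.take j ++ [' '] ++ r.drop (j + 1) else r) row with hr
    by_cases hd : drow.getD k false = true
    · rw [if_pos hd]
      have hkr : k < r.length := by omega
      have hlt : (List.take k r ++ [' ']).length = k + 1 := by
        simp [List.length_take]; omega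
      rcases Nat.lt_trichotomy j k with hj | hj | hj
      · rw [List.getElem?_append_left (by omega : j < (List.take k r ++ [' ']).length),
            List.getElem?_append_left (by simp [List.length_take]; omega),
            List.getElem?_take, if_pos hj, hk]
        simp [hj, Nat.lt_succ_of_lt hj]
      · subst hj
        rw [List.getElem?_append_left (by omega : j < (List.take j r ++ [' ']).length),
            List.getElem?_append_right (by rw [List.length_take]; omega),
            (by rw [List.length_take]; omega : j - (List.take j r).length = 0),
            if_pos ⟨Nat.lt_succ_self j, hd⟩]
        rfl
      · rw [List.getElem?_append_right (by omega : (List.take k r ++ [' ']).length ≤ j), hlt,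
            List.getElem?_drop,
            (by omega : k + 1 + (j - (k + 1)) = j), hk]
        rw [if_neg (by rintro ⟨hc, _⟩; omega), if_neg (by rintro ⟨hc, _⟩; omega)]
    · rw [if_neg hd, hk]
      rcases Nat.lt_trichotomy j k with hj | hj | hj
      · simp [hj, Nat.lt_succ_of_lt hj]
      · subst hj
        rw [if_neg (by rintro ⟨hlt', _⟩; exact absurd hlt' (lt_irrefl j)),
            if_neg (by rintro ⟨_, hP⟩; exact hd hP)]
      · have e1 : ¬ (j < k) := by omega
        have e2 : ¬ (j < k + 1) := by omega
        simp [e1, e2]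

theorem pvBubble_inv (xs : List Char) (k : Nat) (h : k ≤ xs.length) :
    (List.range k).foldl (fun r j => if r.getD j ' ' = ' ' then ' ' :: (r.take j ++ r.drop (j + 1)) else r) xs =
      List.replicate (k - ((xs.take k).filter (fun x => x ≠ ' ')).length) ' ' ++
        ((xs.take k).filter (fun x => x ≠ ' ') ++ xs.drop k) := by
  induction k with
  | zero => simp
  | succ k ih =>
    have hk := ih (by omega)
    rw [List.range_succ, List.foldl_append, List.foldl_cons, List.foldl_nil, hk]
    have hkc : k < xs.length := by omega
    obtain ⟨ck, hck⟩ : ∃ x, xs[k]? = some x := ⟨xs[k], List.getElem?_eq_getElem hkc⟩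
    set F := (xs.take k).filter (fun x => x ≠ ' ') with hF
    set R := List.replicate (k - F.length) ' ' with hR
    have hFle : F.length ≤ k := by
      calc F.length ≤ (xs.take k).length := List.length_filter_le _ _
        _ ≤ k := by simp [List.length_take]
    have hRF : (R ++ F).length = k := by
      simp [hR, List.length_replicate]; omega
    have hget : (R ++ (F ++ xs.drop k)).getD k ' ' = ck := by
      rw [List.getD_eq_getElem?_getD, ← List.append_assoc,
          List.getElem?_append_right (by rw [hRF] : (R ++ F).length ≤ k), hRF,
          Nat.sub_self, List.getElem?_drop, Nat.add_zero, hck]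
      rfl
    have htake : (xs.take (k + 1)) = xs.take k ++ [ck] := by
      rw [List.take_add_one, hck]
      rfl
    have hdropk : xs.drop k = ck :: xs.drop (k + 1) := by
      rw [List.drop_eq_getElem_cons hkc]
      rw [List.getElem?_eq_getElem hkc] at hck
      simp at hck
      rw [hck]
    by_cases hsp : ck = ' '
    · rw [if_pos (by rw [hget, hsp])]
      have hfil : (xs.take (k + 1)).filter (fun x => x ≠ ' ') = F := by
        rw [htake, List.filter_append, hF]
        simp [hsp]
      rw [hfil]
      have ht : (R ++ (F ++ xs.drop k)).take k = R ++ F := by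
        rw [← List.append_assoc]
        exact List.take_left' hRF
      have hd : (R ++ (F ++ xs.drop k)).drop (k + 1) = xs.drop (k + 1) := by
        rw [← List.append_assoc, hdropk,
            show (R ++ F) ++ (ck :: xs.drop (k + 1)) = ((R ++ F) ++ [ck]) ++ xs.drop (k + 1) by simp,
            show k + 1 = ((R ++ F) ++ [ck]).length by rw [List.length_append, hRF]; rfl]
        exact List.drop_left
      rw [ht, hd]
      have hrepl : k + 1 - F.length = (k - F.length) + 1 := by omega
      rw [hrepl, List.replicate_succ]
      simp [hR]
    · rw [if_neg (by rw [hget]; exact hsp)]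
      have hfil : (xs.take (k + 1)).filter (fun x => x ≠ ' ') = F ++ [ck] := by
        rw [htake, List.filter_append, hF]
        simp [hsp]
      rw [hfil]
      have hrepl : k + 1 - (F ++ [ck]).length = k - F.length := by simp
      rw [hrepl, hdropk]
      simp [hR]

theorem pvBubble_eq (M : Nat) (xs : List Char) (h : xs.length = M) :
    pvBubble M xs =
      List.replicate (M - (xs.filter (fun x => x ≠ ' ')).length) ' ' ++ xs.filter (fun x => x ≠ ' ') := by
  rw [pvBubble, pvBubble_inv xs M (by omega),
      show xs.take M = xs by rw [← h, List.take_length],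
      show xs.drop M = [] by rw [← h, List.drop_length]]
  simp

def pvRowCnt (drow : List Bool) (N : Nat) : Int :=
  ((List.range N).map (fun j => if drow.getD j false then (1 : Int) else 0)).sum

theorem pv_filter_eq_filterMap {α β : Type} (p : β → Bool) (g : α → β) (hfn : α → Option β)
    (l : List α) (H : ∀ a ∈ l, hfn a = if p (g a) then some (g a) else none) :
    (l.map g).filter p = l.filterMap hfn := by
  induction l with
  | nil => rfl
  | cons x xs ih =>
    rw [List.map_cons, List.filter_cons, List.filterMap_cons, H x (List.mem_cons_self)]
    have := ih (fun a ha => H a (List.mem_cons_of_mem x ha))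
    by_cases hp : p (g x) = true <;> simp [hp, this]

theorem pv_pass1_inner (del : List (List Bool)) (N i : Nat) (b : List (List Char)) (c : Int) :
    (PySem.List.pyRange 0 (N : Int) 1).foldl
      (fun (st : List (List Char) × Int) j =>
        if PySem.List.pyGetD (PySem.List.pyGetD del (i : Int) []) j false then
          (pvSet st.1 (i : Int)
            (PySem.List.slice (PySem.List.pyGetD st.1 (i : Int) []) none (some j) ++ [' '] ++
              PySem.List.slice (PySem.List.pyGetD st.1 (i : Int) []) (some (j + 1)) none),
           st.2 + 1)
        else st) (b, c)
    = (b.set i (pvRowDel (del.getD i []) N (b.getD i [])), c + pvRowCnt (del.getD i []) N) := by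
  induction N with
  | zero =>
    simp only [Nat.cast_zero, PySem.List.pyRange_zero, Int.toNat_zero, List.range_zero,
      List.map_nil, List.foldl_nil, pvRowDel, pvRowCnt, List.map_nil, List.sum_nil, add_zero]
    rw [pv_set_getD_self]
  | succ N ih =>
    rw [show ((N + 1 : Nat) : Int) = (N : Int) + 1 by push_cast; ring,
      PySem.List.pyRange_one_succ_right (by positivity : (0:Int) ≤ (N:Int)), List.foldl_append,
      List.foldl_cons, List.foldl_nil, ih]
    rw [PySem.List.pyGetD_natCast del i []]
    by_cases hd : (del.getD i []).getD N false = true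
    · rw [if_pos (by rw [PySem.List.pyGetD_natCast]; simpa using hd)]
      have hsl1 : ∀ r : List Char, PySem.List.slice r none (some (N : Int)) = r.take N :=
        fun r => PySem.List.slice_to_natCast r N
      have hsl2 : ∀ r : List Char, PySem.List.slice r (some ((N : Int) + 1)) none = r.drop (N + 1) := by
        intro r
        rw [show ((N : Int) + 1) = ((N + 1 : Nat) : Int) by push_cast; ring]
        exact PySem.List.slice_from_natCast r (N + 1)
      have hstep : pvRowDel (del.getD i []) (N + 1) (b.getD i []) =
          (pvRowDel (del.getD i []) N (b.getD i [])).take N ++ [' '] ++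
            (pvRowDel (del.getD i []) N (b.getD i [])).drop (N + 1) := by
        rw [pvRowDel, List.range_succ, List.foldl_append, List.foldl_cons, List.foldl_nil, ← pvRowDel,
          if_pos hd]
      have hcnt : pvRowCnt (del.getD i []) (N + 1) = pvRowCnt (del.getD i []) N + 1 := by
        rw [pvRowCnt, List.range_succ, List.map_append, List.sum_append, ← pvRowCnt,
          List.map_cons, List.map_nil, if_pos hd]
        simp
      by_cases hib : i < b.length
      · have hrow : PySem.List.pyGetD (b.set i (pvRowDel (del.getD i []) N (b.getD i []))) (i : Int) [] =
            pvRowDel (del.getD i []) N (b.getD i []) := by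
          rw [PySem.List.pyGetD_natCast, List.getD_eq_getElem?_getD, List.getElem?_set_self hib]
          rfl
        simp only [hrow, hsl1, hsl2, pvSet, Int.toNat_natCast, List.set_set]
        rw [hstep, hcnt, Prod.mk.injEq]
        exact ⟨rfl, by ring⟩
      · have hnoop : ∀ v : List Char, (b.set i v) = b := fun v => List.set_eq_of_length_le (by omega)
        simp only [pvSet, Int.toNat_natCast, hnoop, hcnt]
        rw [Prod.mk.injEq]
        exact ⟨rfl, by ring⟩
    · rw [if_neg (by rw [PySem.List.pyGetD_natCast]; simpa using hd)]
      have hstep : pvRowDel (del.getD i []) (N + 1) (b.getD i []) =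
          pvRowDel (del.getD i []) N (b.getD i []) := by
        rw [pvRowDel, List.range_succ, List.foldl_append, List.foldl_cons, List.foldl_nil, ← pvRowDel,
          if_neg hd]
      have hcnt : pvRowCnt (del.getD i []) (N + 1) = pvRowCnt (del.getD i []) N := by
        rw [pvRowCnt, List.range_succ, List.map_append, List.sum_append, ← pvRowCnt,
          List.map_cons, List.map_nil, if_neg hd]
        simp
      rw [hstep, hcnt]

theorem pv_pass1_outer (del : List (List Bool)) (N M : Nat) (b0 : List (List Char)) (c : Int) :
    (PySem.List.pyRange 0 (M : Int) 1).foldl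
      (fun (st : List (List Char) × Int) i =>
        (PySem.List.pyRange 0 (N : Int) 1).foldl
          (fun (st : List (List Char) × Int) j =>
            if PySem.List.pyGetD (PySem.List.pyGetD del i []) j false then
              (pvSet st.1 i
                (PySem.List.slice (PySem.List.pyGetD st.1 i []) none (some j) ++ [' '] ++
                  PySem.List.slice (PySem.List.pyGetD st.1 i []) (some (j + 1)) none),
               st.2 + 1)
            else st) st) (b0, c)
    = (b0.mapIdx (fun i row => if i < M then pvRowDel (del.getD i []) N row else row),
       c + ((List.range M).map (fun i => pvRowCnt (del.getD i []) N)).sum) := by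
  induction M with
  | zero =>
    simp only [Nat.cast_zero, PySem.List.pyRange_zero, Int.toNat_zero, List.range_zero,
      List.map_nil, List.foldl_nil, List.sum_nil, add_zero, Nat.not_lt_zero, if_false]
    rw [Prod.mk.injEq]
    refine ⟨Eq.symm ?_, rfl⟩
    apply List.ext_getElem?
    intro t
    simp [List.getElem?_mapIdx]
  | succ M ih =>
    rw [show ((M + 1 : Nat) : Int) = (M : Int) + 1 by push_cast; ring,
      PySem.List.pyRange_one_succ_right (by positivity : (0:Int) ≤ (M:Int)), List.foldl_append,
      List.foldl_cons, List.foldl_nil, ih]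
    rw [pv_pass1_inner del N M _ _]
    have hrow : (b0.mapIdx fun i row => if i < M then pvRowDel (del.getD i []) N row else row).getD M [] =
        b0.getD M [] := by
      rw [List.getD_eq_getElem?_getD, List.getD_eq_getElem?_getD, List.getElem?_mapIdx]
      cases b0[M]? <;> simp
    rw [hrow, Prod.mk.injEq]
    constructor
    · apply List.ext_getElem?
      intro t
      by_cases ht : t = M
      · subst ht
        by_cases htb : t < b0.length
        · rw [List.getElem?_set_self (by simpa using htb), List.getElem?_mapIdx,
            List.getElem?_eq_getElem htb]
          simp [List.getD_eq_getElem?_getD, List.getElem?_eq_getElem htb]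
        · rw [List.getElem?_eq_none (by simpa using htb), List.getElem?_mapIdx,
            List.getElem?_eq_none (by omega : b0.length ≤ t)]
          rfl
      · rw [List.getElem?_set_ne (fun he => ht he.symm), List.getElem?_mapIdx, List.getElem?_mapIdx]
        cases hbt : b0[t]? with
        | none => rfl
        | some row =>
          simp only [Option.map_some]
          congr 1
          rcases Nat.lt_trichotomy t M with h1 | h1 | h1
          · rw [if_pos h1, if_pos (by omega)]
          · exact absurd h1 ht
          · rw [if_neg (by omega), if_neg (by omega)]
    · rw [List.range_succ, List.map_append, List.sum_append]
      simp
      ring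

theorem pv_bubble_inner (M i : Nat) (rot : List (List Char)) :
    (PySem.List.pyRange 0 (M : Int) 1).foldl
      (fun rot j =>
        if PySem.List.pyGetD (PySem.List.pyGetD rot (i : Int) []) j ' ' = ' ' then
          pvSet rot (i : Int)
            (' ' :: (PySem.List.slice (PySem.List.pyGetD rot (i : Int) []) none (some j) ++
              PySem.List.slice (PySem.List.pyGetD rot (i : Int) []) (some (j + 1)) none))
        else rot) rot
    = rot.set i (pvBubble M (rot.getD i [])) := by
  induction M with
  | zero =>
    simp only [Nat.cast_zero, PySem.List.pyRange_zero, Int.toNat_zero, List.range_zero,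
      List.map_nil, List.foldl_nil, pvBubble, List.foldl_nil]
    rw [pv_set_getD_self]
  | succ M ih =>
    rw [show ((M + 1 : Nat) : Int) = (M : Int) + 1 by push_cast; ring,
      PySem.List.pyRange_one_succ_right (by positivity : (0:Int) ≤ (M:Int)), List.foldl_append,
      List.foldl_cons, List.foldl_nil, ih]
    have hstep : pvBubble (M + 1) (rot.getD i []) =
        if (pvBubble M (rot.getD i [])).getD M ' ' = ' ' then
          ' ' :: ((pvBubble M (rot.getD i [])).take M ++ (pvBubble M (rot.getD i [])).drop (M + 1))
        else pvBubble M (rot.getD i []) := by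
      rw [pvBubble, List.range_succ, List.foldl_append, List.foldl_cons, List.foldl_nil, ← pvBubble]
    have hsl1 : ∀ r : List Char, PySem.List.slice r none (some (M : Int)) = r.take M :=
      fun r => PySem.List.slice_to_natCast r M
    have hsl2 : ∀ r : List Char, PySem.List.slice r (some ((M : Int) + 1)) none = r.drop (M + 1) := by
      intro r
      rw [show ((M : Int) + 1) = ((M + 1 : Nat) : Int) by push_cast; ring]
      exact PySem.List.slice_from_natCast r (M + 1)
    by_cases hib : i < rot.length
    · have hread : PySem.List.pyGetD (rot.set i (pvBubble M (rot.getD i []))) (i : Int) [] =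
          pvBubble M (rot.getD i []) := by
        rw [PySem.List.pyGetD_natCast, List.getD_eq_getElem?_getD, List.getElem?_set_self hib]
        rfl
      rw [hread]
      by_cases hc : (pvBubble M (rot.getD i [])).getD M ' ' = ' '
      · rw [if_pos (by rw [PySem.List.pyGetD_natCast]; exact hc)]
        simp only [hsl1, hsl2, pvSet, Int.toNat_natCast, List.set_set]
        rw [hstep, if_pos hc]
      · rw [if_neg (by rw [PySem.List.pyGetD_natCast]; exact hc)]
        rw [hstep, if_neg hc]
    · have hnoop : ∀ v : List Char, (rot.set i v) = rot := fun v => List.set_eq_of_length_le (by omega)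
      rw [hnoop]
      have hread : PySem.List.pyGetD rot (i : Int) [] = [] := by
        rw [PySem.List.pyGetD_natCast, List.getD_eq_getElem?_getD,
          List.getElem?_eq_none (by omega : rot.length ≤ i)]
        rfl
      rw [hread]
      rw [if_pos (by rfl), pvSet, Int.toNat_natCast, List.set_eq_of_length_le (by omega), hnoop]

theorem pv_bubble_outer (N M : Nat) (rot : List (List Char)) :
    (PySem.List.pyRange 0 (N : Int) 1).foldl
      (fun rot i =>
        (PySem.List.pyRange 0 (M : Int) 1).foldl
          (fun rot j =>
            if PySem.List.pyGetD (PySem.List.pyGetD rot i []) j ' ' = ' ' then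
              pvSet rot i
                (' ' :: (PySem.List.slice (PySem.List.pyGetD rot i []) none (some j) ++
                  PySem.List.slice (PySem.List.pyGetD rot i []) (some (j + 1)) none))
            else rot) rot) rot
    = rot.mapIdx (fun i r => if i < N then pvBubble M r else r) := by
  induction N with
  | zero =>
    simp only [Nat.cast_zero, PySem.List.pyRange_zero, Int.toNat_zero, List.range_zero,
      List.map_nil, List.foldl_nil, Nat.not_lt_zero, if_false]
    apply List.ext_getElem?
    intro t
    simp [List.getElem?_mapIdx]
  | succ N ih =>
    rw [show ((N + 1 : Nat) : Int) = (N : Int) + 1 by push_cast; ring,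
      PySem.List.pyRange_one_succ_right (by positivity : (0:Int) ≤ (N:Int)), List.foldl_append,
      List.foldl_cons, List.foldl_nil, ih]
    rw [pv_bubble_inner M N _]
    have hrow : (rot.mapIdx fun i r => if i < N then pvBubble M r else r).getD N [] =
        rot.getD N [] := by
      rw [List.getD_eq_getElem?_getD, List.getD_eq_getElem?_getD, List.getElem?_mapIdx]
      cases rot[N]? <;> simp
    rw [hrow]
    apply List.ext_getElem?
    intro t
    by_cases ht : t = N
    · subst ht
      by_cases htb : t < rot.length
      · rw [List.getElem?_set_self (by simpa using htb), List.getElem?_mapIdx,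
          List.getElem?_eq_getElem htb]
        simp [List.getD_eq_getElem?_getD, List.getElem?_eq_getElem htb]
      · rw [List.getElem?_eq_none (by simpa using htb), List.getElem?_mapIdx,
          List.getElem?_eq_none (by omega : rot.length ≤ t)]
        rfl
    · rw [List.getElem?_set_ne (fun he => ht he.symm), List.getElem?_mapIdx, List.getElem?_mapIdx]
      cases hbt : rot[t]? with
      | none => rfl
      | some r =>
        simp only [Option.map_some]
        congr 1
        rcases Nat.lt_trichotomy t N with h1 | h1 | h1
        · rw [if_pos h1, if_pos (by omega)]
        · exact absurd h1 ht
        · rw [if_neg (by omega), if_neg (by omega)]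

-- ===== VERDICT (by name: the statement is the Claim_ definition above) =====
theorem delBlock_spec : Claim_equal_delBlock := by
  intro m n board delete hdom hpre
  show delBlock m n board delete = delBlock_alt m n board delete
  have hmr : PySem.List.pyRange 0 m 1 = PySem.List.pyRange 0 (m.toNat : Int) 1 := by
    rw [PySem.List.pyRange_zero, PySem.List.pyRange_zero, Int.toNat_natCast]
  have hnr : PySem.List.pyRange 0 n 1 = PySem.List.pyRange 0 (n.toNat : Int) 1 := by
    rw [PySem.List.pyRange_zero, PySem.List.pyRange_zero, Int.toNat_natCast]
  simp only [delBlock, delBlock_alt, hmr, hnr]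
  rw [pv_pass1_outer delete n.toNat m.toNat (board.map String.toList) 0]
  simp only [PySem.List.foldl_append_singleton_eq_map, List.nil_append]
  rw [pv_bubble_outer n.toNat m.toNat _]
  simp only [PySem.List.pyRange_zero, Int.toNat_natCast, List.map_map, List.filterMap_map,
    Function.comp, PySem.List.pyGetD_natCast]
  rw [Prod.mk.injEq]
  constructor
  case left =>
    have hNlen : ∀ t, t < m.toNat → t < board.length → n.toNat ≤ (board.getD t "").toList.length := by
      intro t htM htb
      by_cases h0n : 0 < n
      · have h0m : 0 < m := by omega
        obtain ⟨hb1, hb2, hs, _⟩ := hpre h0m h0n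
        have htk : t < (board.take m.toNat).length := by
          simp only [List.length_take]; omega
        have hmem := List.getElem_mem htk
        rw [List.getElem_take] at hmem
        have hle := hs _ hmem
        have hbg : board.getD t "" = board[t] := by
          rw [List.getD_eq_getElem?_getD, List.getElem?_eq_getElem htb]
          rfl
        rw [hbg]
        omega
      · have hn0 : n.toNat = 0 := by omega
        omega
    refine List.map_congr_left (fun i hi => ?_)
    rw [List.mem_range] at hi
    simp only [Function.comp_apply]
    congr 1
    refine List.map_congr_left (fun j hj => ?_)
    rw [List.mem_range] at hj
    simp only [Function.comp_apply, PySem.List.pyGetD_natCast]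
    congr 1
    -- per-column equality
    rw [List.getD_eq_getElem?_getD, List.getD_eq_getElem?_getD, List.getElem?_mapIdx,
      List.getElem?_map, List.getElem?_map, List.getElem?_range hj]
    simp only [Option.map_some, Function.comp_apply, Option.getD_some, if_pos hj]
    have hlenc : (List.map
        ((fun x => PySem.List.pyGetD
            (PySem.List.pyGetD
              (List.mapIdx (fun i row => if i < m.toNat then pvRowDel (delete.getD i []) n.toNat row else row)
                (List.map String.toList board)) x []) (j : Int) ' ') ∘ (fun k : Nat => (k : Int)))
        (List.range m.toNat)).length = m.toNat := by
      simp
    rw [pvBubble_eq m.toNat _ hlenc]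
    clear hlenc
    set b0 := List.map String.toList board with hb0
    set P1 := List.mapIdx (fun i row => if i < m.toNat then pvRowDel (delete.getD i []) n.toNat row else row) b0 with hP1
    set G := ((fun x => PySem.List.pyGetD (PySem.List.pyGetD P1 x []) (j : Int) ' ') ∘ (fun k : Nat => (k : Int))) with hG
    set HB := (fun x : Nat =>
      if PySem.List.pyGetD (delete.getD x []) (j : Int) false = false ∧
          PySem.List.pyGetD (b0.getD x []) (j : Int) ' ' ≠ ' ' then
        some (PySem.List.pyGetD (b0.getD x []) (j : Int) ' ')
      else none) with hHB
    have hH : ∀ t ∈ List.range m.toNat, HB t =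
        if (fun x => decide (x ≠ ' ')) (G t) then some (G t) else none := by
      intro t ht
      rw [List.mem_range] at ht
      have hGt : G t = if (delete.getD t []).getD j false = true then ' '
          else (b0.getD t []).getD j ' ' := by
        rw [hG]
        simp only [Function.comp_apply, PySem.List.pyGetD_natCast]
        by_cases htb : t < b0.length
        · have h1 : P1.getD t [] = pvRowDel (delete.getD t []) n.toNat (b0.getD t []) := by
            rw [hP1, List.getD_eq_getElem?_getD, List.getElem?_mapIdx,
              List.getElem?_eq_getElem htb]
            simp only [Option.map_some, Option.getD_some, if_pos ht]
            simp [List.getD_eq_getElem?_getD, List.getElem?_eq_getElem htb]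
          have hlen2 : n.toNat ≤ (b0.getD t []).length := by
            have hbb : b0.getD t [] = (board.getD t "").toList := by
              rw [hb0, List.getD_eq_getElem?_getD, List.getD_eq_getElem?_getD,
                List.getElem?_map]
              cases board[t]? <;> rfl
            rw [hbb]
            exact hNlen t ht (by simpa [hb0] using htb)
          rw [h1, List.getD_eq_getElem?_getD, pvRowDel_getElem? _ _ _ hlen2 j]
          by_cases hbit : (delete.getD t []).getD j false = true
          · rw [if_pos ⟨hj, hbit⟩, if_pos hbit]
            rfl
          · rw [if_neg (by rintro ⟨_, hb⟩; exact hbit hb), if_neg hbit]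
            simp [List.getD_eq_getElem?_getD]
        · have h2 : P1.getD t [] = [] := by
            rw [hP1, List.getD_eq_getElem?_getD, List.getElem?_mapIdx,
              List.getElem?_eq_none (by simpa using (by omega : b0.length ≤ t))]
            rfl
          have h3 : b0.getD t [] = [] := by
            rw [List.getD_eq_getElem?_getD, List.getElem?_eq_none (by omega : b0.length ≤ t)]
            rfl
          rw [h2, h3]
          simp
      rw [hGt, hHB]
      rw [List.getD_eq_getElem?_getD]
      by_cases hbit : (delete[t]?.getD [])[j]?.getD false = true
      · simp [hbit, List.getD_eq_getElem?_getD]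
      · by_cases hc : (b0.getD t []).getD j ' ' = ' ' <;>
          simp [hbit, hc, List.getD_eq_getElem?_getD]
    have hKle : (List.filter (fun x => decide (x ≠ ' ')) (List.map G (List.range m.toNat))).length ≤ m.toNat := by
      calc (List.filter (fun x => decide (x ≠ ' ')) (List.map G (List.range m.toNat))).length
          ≤ (List.map G (List.range m.toNat)).length := List.length_filter_le _ _
        _ = m.toNat := by simp
    have hfil : List.filter (fun x => decide (x ≠ ' ')) (List.map G (List.range m.toNat)) =
        List.filterMap HB (List.range m.toNat) :=
      pv_filter_eq_filterMap _ G HB _ hH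
    rw [hfil] at hKle ⊢
    have harith : (m - ((List.filterMap HB (List.range m.toNat)).length : Int)).toNat =
        m.toNat - (List.filterMap HB (List.range m.toNat)).length := by omega
    rw [harith]
  case right =>
    rw [zero_add]
    refine congrArg _ (List.map_congr_left fun t ht => ?_)
    simp [Function.comp_def, PySem.List.pyGetD_natCast, pvRowCnt]
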